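-- pv_equiv track=rewrite | github.com/nathanieljwise/PersonalProjects | misc/scale_calculator.py | descending_melodic_minor_scale
-- ===== SOURCE A (Python) =====
-- MUSICAL_NOTES = ['C', 'D\u266d', 'D', 'E\u266d', 'E', 'F', 'G\u266d', 'G', 'A\u266d', 'A', 'B\u266d', 'B']
--
-- DESCENDING_MELODIC_MINOR_SCALE = [2, 2, 1, 2, 2, 1, 2]
--
-- def descending_melodic_minor_scale(first_note):
--     musical_notes = MUSICAL_NOTES * 2  # Elongate scale to avoid range errors
--     user_note_list = [musical_notes[first_note]]  # Start list to keep notes in scale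
--     next_note = first_note  # Rename to avoid confusion
--     for i in range(0, len(DESCENDING_MELODIC_MINOR_SCALE)):
--         user_note_list = user_note_list + [musical_notes[next_note + DESCENDING_MELODIC_MINOR_SCALE[i]]]  # Put next note in list
--         next_note = next_note + int(DESCENDING_MELODIC_MINOR_SCALE[i])  # Interval dictated by descending melodic minor scale sequence
--     return user_note_list
-- ===== SOURCE B (Python) =====
-- MUSICAL_NOTES = ['C', 'D\u266d', 'D', 'E\u266d', 'E', 'F', 'G\u266d', 'G', 'A\u266d', 'A', 'B\u266d', 'B']
--
-- DESCENDING_MELODIC_MINOR_SCALE = [2, 2, 1, 2, 2, 1, 2]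
--
-- SCALE_DEGREES = (0, 2, 4, 5, 7, 9, 10, 12)  # semitone positions of the scale degrees
--
-- def descending_melodic_minor_scale(first_note):
--     # Modular rotation: reduce the start note to its pitch class, rotate the
--     # 12-note circle so that class comes first, then read the scale degrees
--     # off fixed positions of the rotated circle.
--     pc = first_note % 12
--     rotated = MUSICAL_NOTES[pc:] + MUSICAL_NOTES[:pc]
--     return [rotated[d % 12] for d in SCALE_DEGREES]
-- ===== Notes on version B (the rewrite author's own statement) =====
-- stated objective: alternative
-- what changed: Replaces A's walk along a doubled note list with a running next_note accumulator by modular pitch-class arithmetic: rotate the chromatic circle to the start note's pitch class and read the scale off fixed degree positions.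
import Mathlib
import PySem

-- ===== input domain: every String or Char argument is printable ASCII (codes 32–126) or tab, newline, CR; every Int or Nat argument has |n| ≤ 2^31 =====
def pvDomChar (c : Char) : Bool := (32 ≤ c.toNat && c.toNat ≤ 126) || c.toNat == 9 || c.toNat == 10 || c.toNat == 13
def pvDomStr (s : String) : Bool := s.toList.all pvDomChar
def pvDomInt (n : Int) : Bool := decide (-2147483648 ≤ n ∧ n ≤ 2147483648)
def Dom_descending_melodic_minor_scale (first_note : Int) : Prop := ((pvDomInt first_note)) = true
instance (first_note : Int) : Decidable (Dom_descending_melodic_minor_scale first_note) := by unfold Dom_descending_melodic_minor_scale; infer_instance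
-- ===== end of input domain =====

-- B replaces A's doubled-list walk with a running accumulator by modular arithmetic:
-- rotate the note circle to the start note's pitch class and read fixed scale-degree
-- positions (alternative decomposition, same cost).

-- ===== PORT A =====
def pvMusicalNotes : List String :=
  ["C", "D♭", "D", "E♭", "E", "F", "G♭", "G", "A♭", "A", "B♭", "B"]

def pvIntervals : List Int := [2, 2, 1, 2, 2, 1, 2]

def descending_melodic_minor_scale (first_note : Int) : List String :=
  let musical_notes := pvMusicalNotes ++ pvMusicalNotes
  let user_note_list := [(PySem.List.pyGet? musical_notes first_note).getD ""]
  -- for i in range(0, 7): append musical_notes[next_note + interval[i]]; next_note += interval[i]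
  let r := (PySem.List.pyRange 0 7 1).foldl
    (fun (st : List String × Int) i =>
      let step := (PySem.List.pyGet? pvIntervals i).getD 0
      (st.1 ++ [(PySem.List.pyGet? musical_notes (st.2 + step)).getD ""], st.2 + step))
    (user_note_list, first_note)
  r.1

-- ===== PORT B =====
def pvScaleDegrees : List Int := [0, 2, 4, 5, 7, 9, 10, 12]

def descending_melodic_minor_scale_alt (first_note : Int) : List String :=
  let pc := PySem.Int.mod first_note 12
  let rotated := PySem.List.slice pvMusicalNotes (some pc) none
                 ++ PySem.List.slice pvMusicalNotes none (some pc)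
  pvScaleDegrees.map (fun d => (PySem.List.pyGet? rotated (PySem.Int.mod d 12)).getD "")

-- ===== PRECONDITION & SPEC =====
-- Pre_ excludes exactly the inputs where Python A raises IndexError on the doubled
-- note list (the highest index A uses is one full octave above the start note).
def Pre_descending_melodic_minor_scale (first_note : Int) : Prop :=
  -24 ≤ first_note ∧ first_note ≤ 11
instance (first_note : Int) : Decidable (Pre_descending_melodic_minor_scale first_note) := by
  unfold Pre_descending_melodic_minor_scale; infer_instance

def pvWitness_descending_melodic_minor_scale : Int := 0

def Spec_descending_melodic_minor_scale (first_note : Int) (out : List String) : Prop := out = descending_melodic_minor_scale_alt first_note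
instance (first_note : Int) (out : List String) : Decidable (Spec_descending_melodic_minor_scale first_note out) := by unfold Spec_descending_melodic_minor_scale; infer_instance

-- ===== CLAIM =====
def Claim_equal_descending_melodic_minor_scale : Prop := ∀ (first_note : Int), Dom_descending_melodic_minor_scale first_note → Pre_descending_melodic_minor_scale first_note → Spec_descending_melodic_minor_scale first_note (descending_melodic_minor_scale first_note)

-- ===== LEMMAS AND PROOFS =====

-- ===== VERDICT =====
theorem descending_melodic_minor_scale_spec : Claim_equal_descending_melodic_minor_scale := by
  intro first_note _ hpre
  unfold Spec_descending_melodic_minor_scale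
  obtain ⟨h1, h2⟩ := hpre
  interval_cases first_note <;> decide
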